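-- pv_equiv track=rewrite | github.com/sacrificy/Batch-processing-PDF | text_extract/catalog_grouping.py | catalog_list_grouping
-- ===== SOURCE A (Python) =====
-- def catalog_list_grouping(list):
--     dic = {}
--     # split_keyword = r'\.+'
--     for item in list:
--         # pattern = re.compile(split_keyword)
--         # temp_list = pattern.split(item)
--         # strinfo = re.compile('\s+')
--         # page = strinfo.sub('', temp_list[-1])
--         page=item[3]
--         page=page.strip()
--         name=item[0]
--         name=name.rstrip()
--         if page in dic:
--             dic[page].append(name)
--         else:
--             dic[page] = [name]
--
--     return dic
-- ===== SOURCE B (Python) =====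
-- def catalog_list_grouping(list):
--     # Flatten once: (stripped page key, rstripped name) per item.
--     pairs = [(item[3].strip(), item[0].rstrip()) for item in list]
--     # Page keys in first-appearance order, then one comprehension per key.
--     keys = dict.fromkeys(p for p, _ in pairs)
--     return {k: [n for p, n in pairs if p == k] for k in keys}
-- ===== Notes on version B (the rewrite author's own statement) =====
-- stated objective: alternative
-- what changed: B replaces A's single pass that mutates a dict of growing lists with a declarative pipeline: map each item to a (stripped page, rstripped name) pair once, take the page keys in first-appearance order via dict.fromkeys, and build each group with a filter comprehension per key.
import Mathlib
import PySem

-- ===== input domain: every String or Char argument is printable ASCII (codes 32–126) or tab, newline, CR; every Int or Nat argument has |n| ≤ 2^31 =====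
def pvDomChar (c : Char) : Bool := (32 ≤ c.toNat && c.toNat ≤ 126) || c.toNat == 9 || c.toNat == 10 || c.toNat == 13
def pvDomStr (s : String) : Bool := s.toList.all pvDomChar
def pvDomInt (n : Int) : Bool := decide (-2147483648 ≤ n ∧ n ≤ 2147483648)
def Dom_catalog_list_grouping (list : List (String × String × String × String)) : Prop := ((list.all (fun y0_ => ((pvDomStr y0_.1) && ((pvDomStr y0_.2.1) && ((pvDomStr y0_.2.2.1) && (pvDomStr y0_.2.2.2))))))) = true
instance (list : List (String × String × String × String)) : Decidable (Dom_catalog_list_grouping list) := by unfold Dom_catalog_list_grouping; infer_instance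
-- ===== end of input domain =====

-- B builds the groups declaratively (map to pairs, dedup keys, filter per key) instead of mutating a dict in one pass; same result, alternative decomposition.

-- ===== PORT A =====
def catalog_list_grouping (list : List (String × String × String × String)) : List (String × List String) :=
  (list.foldl (fun dic item =>
      let page := PySem.Str.strip item.2.2.2
      let name := PySem.Str.rstrip item.1
      if dic.contains page then dic.modify page [] (fun v => v ++ [name])
      else dic.insert page [name])
    PySem.Dict.empty).items

-- ===== PORT B =====
def catalog_list_grouping_alt (list : List (String × String × String × String)) : List (String × List String) :=
  let pairs := list.map (fun item => (PySem.Str.strip item.2.2.2, PySem.Str.rstrip item.1))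
  let keys := PySem.List.dedup (pairs.map (fun p => p.1))
  keys.map (fun k => (k, (pairs.filter (fun p => p.1 == k)).map (fun p => p.2)))

-- ===== PRECONDITION & SPEC =====
def Spec_catalog_list_grouping (list : List (String × String × String × String)) (out : List (String × List String)) : Prop := out = catalog_list_grouping_alt list
instance (list : List (String × String × String × String)) (out : List (String × List String)) : Decidable (Spec_catalog_list_grouping list out) := by unfold Spec_catalog_list_grouping; infer_instance

-- ===== CLAIM (what is proved, stated in full; the proofs are below) =====
def Claim_equal_catalog_list_grouping : Prop := ∀ (list : List (String × String × String × String)), Dom_catalog_list_grouping list → Spec_catalog_list_grouping list (catalog_list_grouping list)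

-- ===== LEMMAS AND PROOFS =====

-- A's branch (append if present, fresh singleton otherwise) is exactly Dict.modify with default [].
theorem pv_branch_eq_modify (d : PySem.Dict String (List String)) (k : String) (v : String) :
    (if d.contains k then d.modify k [] (fun l => l ++ [v]) else d.insert k [v])
      = d.modify k [] (fun l => l ++ [v]) := by
  by_cases h : d.contains k = true
  · simp [h]
  · have hg : d.getD k [] = [] := by
      apply PySem.Dict.getD_of_not_contains
      simpa using h
    simp [h, PySem.Dict.modify, hg]

theorem pv_foldA_eq (list : List (String × String × String × String)) :
    (list.foldl (fun dic item =>
        let page := PySem.Str.strip item.2.2.2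
        let name := PySem.Str.rstrip item.1
        if dic.contains page then dic.modify page [] (fun v => v ++ [name])
        else dic.insert page [name]) PySem.Dict.empty)
    = ((list.map (fun item => (PySem.Str.strip item.2.2.2, PySem.Str.rstrip item.1))).foldl
        (fun d p => d.modify p.1 [] (fun l => l ++ [p.2])) PySem.Dict.empty) := by
  rw [List.foldl_map]
  apply PySem.List.foldl_congr_mem
  intro d item _
  exact pv_branch_eq_modify d _ _

-- ===== VERDICT (by name: the statement is the Claim_ definition above) =====
theorem catalog_list_grouping_spec : Claim_equal_catalog_list_grouping := by
  intro list _
  unfold Spec_catalog_list_grouping catalog_list_grouping catalog_list_grouping_alt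
  rw [pv_foldA_eq]
  set pairs := list.map (fun item => (PySem.Str.strip item.2.2.2, PySem.Str.rstrip item.1)) with hpairs
  set D := pairs.foldl (fun d p => d.modify p.1 [] (fun l => l ++ [p.2])) PySem.Dict.empty with hD
  have hnod : D.keys.Nodup := by
    rw [hD]
    exact PySem.Dict.nodup_keys_foldl_modify_key pairs (fun p => p.1) []
      (fun d p => fun l => l ++ [p.2]) PySem.Dict.empty (by simp)
  have hkeys : D.keys = PySem.List.dedup (pairs.map (fun p => p.1)) := by
    rw [hD]
    rw [PySem.Dict.keys_foldl_modify_key]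
    simp [PySem.List.dedup_eq_ofList, PySem.Dict.keys_empty]
    rfl
  rw [PySem.Dict.items_eq_map_keys D hnod [], hkeys]
  apply List.map_congr_left
  intro k _
  have := PySem.Dict.getD_foldl_modify_append pairs PySem.Dict.empty k
  simp [PySem.Dict.getD_empty] at this
  rw [← hD] at this
  simp [this]
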